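-- pv_equiv track=rewrite | github.com/bravo81-hash/trade-guardian | app.py | get_strategy_dynamic
-- ===== SOURCE A (Python) =====
-- def get_strategy_dynamic(trade_name, group_name, config_dict):
--     t_name = str(trade_name).upper().strip()
--     g_name = str(group_name).upper().strip()
--     sorted_strats = sorted(config_dict.items(), key=lambda x: len(str(x[1]['id'])), reverse=True)
--
--     for strat_name, details in sorted_strats:
--         key = str(details['id']).upper()
--         if key in t_name: return strat_name
--
--     for strat_name, details in sorted_strats:
--         key = str(details['id']).upper()
--         if key in g_name: return strat_name
--
--     return "Other"
-- ===== SOURCE B (Python) =====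
-- def get_strategy_dynamic(trade_name, group_name, config_dict):
--     t_name = str(trade_name).upper().strip()
--     g_name = str(group_name).upper().strip()
--     for target in (t_name, g_name):
--         best_name = None
--         best_len = -1
--         for strat_name, details in config_dict.items():
--             sid = str(details['id'])
--             if sid.upper() in target and len(sid) > best_len:
--                 best_name, best_len = strat_name, len(sid)
--         if best_name is not None:
--             return best_name
--     return "Other"
-- ===== Notes on version B (the rewrite author's own statement) =====
-- stated objective: faster
-- what changed: B drops the sorted() call entirely and replaces sort-then-first-match with a single running-maximum pass per target (strictly-greater update reproduces the stable descending sort's tie-breaking).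
import Mathlib
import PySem

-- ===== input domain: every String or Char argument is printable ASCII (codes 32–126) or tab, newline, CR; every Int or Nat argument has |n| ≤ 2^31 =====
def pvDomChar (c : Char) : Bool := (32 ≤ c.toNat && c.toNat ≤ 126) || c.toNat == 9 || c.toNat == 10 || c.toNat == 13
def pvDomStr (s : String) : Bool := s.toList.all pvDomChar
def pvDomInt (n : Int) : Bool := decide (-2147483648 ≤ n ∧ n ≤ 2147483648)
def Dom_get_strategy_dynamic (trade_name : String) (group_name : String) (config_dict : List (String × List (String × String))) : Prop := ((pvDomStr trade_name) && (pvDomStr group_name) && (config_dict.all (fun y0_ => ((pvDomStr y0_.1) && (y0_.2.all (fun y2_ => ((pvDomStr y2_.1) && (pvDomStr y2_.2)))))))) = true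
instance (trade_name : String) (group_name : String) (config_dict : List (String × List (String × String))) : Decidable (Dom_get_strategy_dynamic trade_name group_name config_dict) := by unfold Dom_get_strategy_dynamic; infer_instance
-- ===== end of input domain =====

-- B replaces A's sort-then-first-match with a single running-maximum pass per target, removing the sorted() call (O(n log n) sort -> O(n) scan); proved equal on all inputs where A does not raise KeyError.


-- ===== PORT A =====
-- details['id'] (a str already, so str(...) is the identity); total via a default, Pre_ guarantees the key is present
def pvStratId (details : List (String × String)) : String :=
  (PySem.Dict.mk details).getD "id" ""

-- the 'for strat_name, details in sorted_strats: if key in target: return strat_name' loop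
def pvFindFirst (target : String) : List (String × List (String × String)) → Option String
  | [] => none
  | (strat_name, details) :: rest =>
      if PySem.Str.isIn (PySem.Str.upper (pvStratId details)) target then some strat_name
      else pvFindFirst target rest

def get_strategy_dynamic (trade_name : String) (group_name : String) (config_dict : List (String × List (String × String))) : String :=
  let t_name := PySem.Str.strip (PySem.Str.upper trade_name)
  let g_name := PySem.Str.strip (PySem.Str.upper group_name)
  let sorted_strats := PySem.List.sorted config_dict (fun x => PySem.Str.len (pvStratId x.2)) true
  match pvFindFirst t_name sorted_strats with
  | some strat_name => strat_name
  | none =>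
    match pvFindFirst g_name sorted_strats with
    | some strat_name => strat_name
    | none => "Other"

-- ===== PORT B =====
-- one pass over config_dict keeping (best_name, best_len); strictly-greater update
def pvBestPass (target : String) (config_dict : List (String × List (String × String))) : Option String × Int :=
  config_dict.foldl (fun best x =>
    let sid := pvStratId x.2
    if PySem.Str.isIn (PySem.Str.upper sid) target && decide (best.2 < PySem.Str.len sid)
    then (some x.1, PySem.Str.len sid) else best) (none, -1)

def get_strategy_dynamic_alt (trade_name : String) (group_name : String) (config_dict : List (String × List (String × String))) : String :=
  let t_name := PySem.Str.strip (PySem.Str.upper trade_name)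
  let g_name := PySem.Str.strip (PySem.Str.upper group_name)
  match (pvBestPass t_name config_dict).1 with
  | some strat_name => strat_name
  | none =>
    match (pvBestPass g_name config_dict).1 with
    | some strat_name => strat_name
    | none => "Other"

-- ===== PRECONDITION & SPEC =====
-- Pre_ excludes exactly the inputs where A raises KeyError: some strategy's details dict has no 'id' key.
def Pre_get_strategy_dynamic (trade_name : String) (group_name : String) (config_dict : List (String × List (String × String))) : Prop :=
  ∀ x ∈ config_dict, (PySem.Dict.mk x.2).contains "id" = true
instance (trade_name : String) (group_name : String) (config_dict : List (String × List (String × String))) : Decidable (Pre_get_strategy_dynamic trade_name group_name config_dict) := by unfold Pre_get_strategy_dynamic; infer_instance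

def pvWitness_get_strategy_dynamic : String × String × (List (String × List (String × String))) :=
  ("xC1y", "", [("S1", [("id", "C1")]), ("S2", [("id", "C12")])])

def Spec_get_strategy_dynamic (trade_name : String) (group_name : String) (config_dict : List (String × List (String × String))) (out : String) : Prop := out = get_strategy_dynamic_alt trade_name group_name config_dict
instance (trade_name : String) (group_name : String) (config_dict : List (String × List (String × String))) (out : String) : Decidable (Spec_get_strategy_dynamic trade_name group_name config_dict out) := by unfold Spec_get_strategy_dynamic; infer_instance

-- ===== CLAIM (what is proved, stated in full; the proofs are below) =====
def Claim_equal_get_strategy_dynamic : Prop := ∀ (trade_name : String) (group_name : String) (config_dict : List (String × List (String × String))), Dom_get_strategy_dynamic trade_name group_name config_dict → Pre_get_strategy_dynamic trade_name group_name config_dict → Spec_get_strategy_dynamic trade_name group_name config_dict (get_strategy_dynamic trade_name group_name config_dict)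

-- ===== LEMMAS AND PROOFS =====

-- proof-only abbreviations for the sort key and the match predicate
def pvK (x : String × List (String × String)) : Int := PySem.Str.len (pvStratId x.2)
def pvP (target : String) (x : String × List (String × String)) : Bool :=
  PySem.Str.isIn (PySem.Str.upper (pvStratId x.2)) target

lemma pvK_nonneg (x : String × List (String × String)) : 0 ≤ pvK x := by
  simp [pvK, PySem.Str.len_eq]

-- A's scan loop is find? followed by the first projection
lemma pvFindFirst_eq_find? (target : String) (l : List (String × List (String × String))) :
    pvFindFirst target l = (l.find? (pvP target)).map (·.1) := by
  induction l with
  | nil => rfl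
  | cons x rest ih =>
    obtain ⟨n, d⟩ := x
    cases h : pvP target (n, d) with
    | true =>
      have h' : PySem.Str.isIn (PySem.Str.upper (pvStratId d)) target = true := h
      rw [pvFindFirst, if_pos h', List.find?_cons_of_pos h]
      rfl
    | false =>
      have h' : PySem.Str.isIn (PySem.Str.upper (pvStratId d)) target = false := h
      rw [pvFindFirst, if_neg (by simpa using h'), List.find?_cons_of_neg (by simp [h]), ih]

-- inserting a non-matching element never changes find?
lemma find?_insertBy_of_neg {p : (String × List (String × String)) → Bool}
    (bef : _ → _ → Bool) (x : String × List (String × String))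
    (l : List (String × List (String × String))) (hx : p x = false) :
    ((PySem.List.insertBy bef x l).find? p) = l.find? p := by
  induction l with
  | nil => simp [PySem.List.insertBy, hx]
  | cons y ys ih =>
    simp only [PySem.List.insertBy]
    split
    · rw [List.find?_cons_of_neg (by simp [hx])]
    · cases hpy : p y with
      | true => rw [List.find?_cons_of_pos hpy, List.find?_cons_of_pos hpy]
      | false => rw [List.find?_cons_of_neg (by simp [hpy]), List.find?_cons_of_neg (by simp [hpy]), ih]

-- a matching element strictly longer than every match of l becomes the first match
lemma find?_insertBy_top {target : String} (x : String × List (String × String))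
    (l : List (String × List (String × String))) (hx : pvP target x = true)
    (hall : ∀ a ∈ l, pvP target a = true → pvK a < pvK x) :
    ((PySem.List.insertBy (fun a b => decide (pvK b < pvK a)) x l).find? (pvP target)) = some x := by
  induction l with
  | nil => simp [PySem.List.insertBy, hx]
  | cons y ys ih =>
    simp only [PySem.List.insertBy]
    split
    · exact List.find?_cons_of_pos hx
    · rename_i hb
      have hky : ¬ pvK y < pvK x := by simpa using hb
      have hpy : pvP target y = false := by
        cases hpy : pvP target y
        · rfl
        · exact absurd (hall y (by simp) hpy) hky
      rw [List.find?_cons_of_neg (by simp [hpy])]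
      exact ih (fun a ha hpa => hall a (by simp [ha]) hpa)

-- a matching element no longer than the current first match leaves it first
lemma find?_insertBy_keep {target : String} (x e : String × List (String × String))
    (l : List (String × List (String × String)))
    (he : l.find? (pvP target) = some e) (hle : pvK x ≤ pvK e)
    (hdesc : l.Pairwise (fun a b => pvK b ≤ pvK a)) :
    ((PySem.List.insertBy (fun a b => decide (pvK b < pvK a)) x l).find? (pvP target)) = some e := by
  induction l with
  | nil => simp at he
  | cons y ys ih =>
    have hey : pvK e ≤ pvK y := by
      have hmem : e ∈ y :: ys := List.mem_of_find?_eq_some he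
      rcases List.mem_cons.mp hmem with h | h
      · exact h ▸ le_refl _
      · exact (List.pairwise_cons.mp hdesc).1 e h
    simp only [PySem.List.insertBy]
    split
    · rename_i hb
      have : pvK y < pvK x := by simpa using hb
      omega
    · cases hpy : pvP target y with
      | true =>
        rw [List.find?_cons_of_pos hpy] at he
        rw [List.find?_cons_of_pos hpy]
        exact he
      | false =>
        rw [List.find?_cons_of_neg (by simp [hpy])] at he
        rw [List.find?_cons_of_neg (by simp [hpy])]
        exact ih he (List.pairwise_cons.mp hdesc).2

-- in a key-descending list every match is at most as long as the first match
lemma key_le_of_find? {target : String} {l : List (String × List (String × String))}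
    {e : String × List (String × String)}
    (hdesc : l.Pairwise (fun a b => pvK b ≤ pvK a))
    (he : l.find? (pvP target) = some e) :
    ∀ a ∈ l, pvP target a = true → pvK a ≤ pvK e := by
  rcases List.find?_eq_some_iff_append.mp he with ⟨hpe, as, bs, rfl, hfail⟩
  intro a ha hpa
  rcases List.mem_append.mp ha with h | h
  · have := hfail a h
    simp [hpa] at this
  · rcases List.mem_cons.mp h with h | h
    · exact h ▸ le_refl _
    · have h2 := (List.pairwise_append.mp hdesc).2.1
      exact (List.pairwise_cons.mp h2).1 a h

-- the single-pass running maximum agrees with first-match-in-stable-descending-sort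
lemma pvMain (target : String) (cfg : List (String × List (String × String))) :
    (∀ e, (PySem.List.sorted cfg (fun x => PySem.Str.len (pvStratId x.2)) true).find? (pvP target) = some e →
      pvBestPass target cfg = (some e.1, pvK e)) ∧
    ((PySem.List.sorted cfg (fun x => PySem.Str.len (pvStratId x.2)) true).find? (pvP target) = none →
      pvBestPass target cfg = (none, -1)) := by
  induction cfg using List.reverseRecOn with
  | nil => exact ⟨fun e h => by simp [PySem.List.sorted] at h, fun _ => rfl⟩
  | append_singleton cfg x ih =>
    have hsorted : PySem.List.sorted (cfg ++ [x]) (fun x => PySem.Str.len (pvStratId x.2)) true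
        = PySem.List.insertBy (fun a b => decide (pvK b < pvK a)) x
            (PySem.List.sorted cfg (fun x => PySem.Str.len (pvStratId x.2)) true) := by
      rw [PySem.List.sorted_rev_eq_foldl_insertBy, PySem.List.sorted_rev_eq_foldl_insertBy,
        List.foldl_append]
      rfl
    have hbp : pvBestPass target (cfg ++ [x]) =
        (if PySem.Str.isIn (PySem.Str.upper (pvStratId x.2)) target
              && decide ((pvBestPass target cfg).2 < PySem.Str.len (pvStratId x.2))
         then (some x.1, PySem.Str.len (pvStratId x.2)) else pvBestPass target cfg) := by
      rw [pvBestPass, pvBestPass, List.foldl_append, List.foldl_cons, List.foldl_nil]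
    have hdesc : (PySem.List.sorted cfg (fun x => PySem.Str.len (pvStratId x.2)) true).Pairwise
        (fun a b => pvK b ≤ pvK a) :=
      PySem.List.sorted_pairwise_rev cfg pvK
    rw [hsorted, hbp]
    by_cases hpx : pvP target x
    · have hpx' : PySem.Str.isIn (PySem.Str.upper (pvStratId x.2)) target = true := hpx
      cases hf : (PySem.List.sorted cfg (fun x => PySem.Str.len (pvStratId x.2)) true).find? (pvP target) with
      | none =>
        have hall : ∀ a ∈ (PySem.List.sorted cfg (fun x => PySem.Str.len (pvStratId x.2)) true),
            pvP target a = true → pvK a < pvK x := by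
          intro a ha hpa
          exact absurd hpa (by simpa using List.find?_eq_none.mp hf a ha)
        have htop := find?_insertBy_top x _ hpx hall
        have hbpc := ih.2 hf
        have hcond : (-1 : Int) < PySem.Str.len (pvStratId x.2) :=
          lt_of_lt_of_le (by norm_num) (pvK_nonneg x)
        rw [hbpc]
        constructor
        · intro e he
          rw [htop] at he
          injection he with he
          subst he
          rw [if_pos (by simp only [Bool.and_eq_true, decide_eq_true_eq]; exact ⟨hpx', hcond⟩)]
          rfl
        · intro he
          rw [htop] at he
          exact absurd he (by simp)
      | some e =>
        have hbpc := ih.1 e hf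
        rw [hbpc]
        by_cases hlt : pvK e < pvK x
        · have hall : ∀ a ∈ (PySem.List.sorted cfg (fun x => PySem.Str.len (pvStratId x.2)) true),
              pvP target a = true → pvK a < pvK x := by
            intro a ha hpa
            exact lt_of_le_of_lt (key_le_of_find? hdesc hf a ha hpa) hlt
          have htop := find?_insertBy_top x _ hpx hall
          have hlt' : pvK e < PySem.Str.len (pvStratId x.2) := hlt
          constructor
          · intro e' he'
            rw [htop] at he'
            injection he' with he'
            subst he'
            rw [if_pos (by simp only [Bool.and_eq_true, decide_eq_true_eq]; exact ⟨hpx', hlt'⟩)]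
            rfl
          · intro he'
            rw [htop] at he'
            exact absurd he' (by simp)
        · push_neg at hlt
          have hkeep := find?_insertBy_keep x e _ hf hlt hdesc
          have hlt' : ¬ pvK e < PySem.Str.len (pvStratId x.2) := not_lt.mpr hlt
          constructor
          · intro e' he'
            rw [hkeep] at he'
            injection he' with he'
            subst he'
            rw [if_neg (by simp only [Bool.and_eq_true, decide_eq_true_eq]; rintro ⟨-, h⟩; exact hlt' h)]
          · intro he'
            rw [hkeep] at he'
            exact absurd he' (by simp)
    · have hneg := find?_insertBy_of_neg (p := pvP target)
        (fun a b => decide (pvK b < pvK a)) x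
        (PySem.List.sorted cfg (fun x => PySem.Str.len (pvStratId x.2)) true)
        (by simpa using hpx)
      rw [hneg, if_neg (by simp only [Bool.and_eq_true]; rintro ⟨h, -⟩; exact hpx h)]
      exact ih

-- ===== VERDICT (by name: the statement is the Claim_ definition above) =====
theorem get_strategy_dynamic_spec : Claim_equal_get_strategy_dynamic := by
  intro trade_name group_name config_dict _ _
  unfold Spec_get_strategy_dynamic get_strategy_dynamic get_strategy_dynamic_alt
  simp only [pvFindFirst_eq_find?]
  have ht := pvMain (PySem.Str.strip (PySem.Str.upper trade_name)) config_dict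
  have hg := pvMain (PySem.Str.strip (PySem.Str.upper group_name)) config_dict
  cases hft : (PySem.List.sorted config_dict (fun x => PySem.Str.len (pvStratId x.2)) true).find?
      (pvP (PySem.Str.strip (PySem.Str.upper trade_name))) with
  | some e =>
    rw [ht.1 e hft]
    rfl
  | none =>
    rw [ht.2 hft]
    cases hfg : (PySem.List.sorted config_dict (fun x => PySem.Str.len (pvStratId x.2)) true).find?
        (pvP (PySem.Str.strip (PySem.Str.upper group_name))) with
    | some e =>
      rw [hg.1 e hfg]
      rfl
    | none =>
      rw [hg.2 hfg]
      rfl
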